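-- pv_equiv track=rewrite | github.com/jKaleba/ASD | BITAlgo/k-NiceSum/zad3k.py | ksuma
-- ===== SOURCE A (Python) =====
-- def ksuma(T, k):
--     n = len(T)
--
--     # f(i) - najmniejsza suma zawierająca T[i], dla ktorej między dowolnymi elementami nie ma odleglosci <= k
--     f = [0 for _ in range(n)]
--     for i in range(k):
--         f[i] = T[i]
--
--     for i in range(k, n):
--         # O(k)
--         f[i] = min(f[i - k:i]) + T[i]
--
--     return min(f[n - k:n])
-- ===== SOURCE B (Python) =====
-- def ksuma(T, k):
--     # Sliding-window minimum over the DP values via a min-annotated two-stack queue: O(n) total.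
--     n = len(T)
--     front = []  # stacks of (value, min of stack); front top = oldest queue element
--     back = []   # back top = newest queue element
--
--     def push(st, v):
--         m = v if not st else min(v, st[-1][1])
--         st.append((v, m))
--
--     def qmin():
--         if not front:
--             return back[-1][1]
--         if not back:
--             return front[-1][1]
--         return min(front[-1][1], back[-1][1])
--
--     def popleft():
--         if not front:
--             while back:
--                 push(front, back.pop()[0])
--         front.pop()
--
--     for i in range(n):
--         fi = T[i] if i < k else qmin() + T[i]
--         push(back, fi)
--         if i >= k:
--             popleft()
--     return qmin()
-- ===== Notes on version B (the rewrite author's own statement) =====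
-- stated objective: faster
-- what changed: The O(k) slice-min recomputed at every DP step is replaced by an amortized-O(1) sliding-window minimum kept in a min-annotated two-stack queue, and the explicit f array disappears.
import Mathlib
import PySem

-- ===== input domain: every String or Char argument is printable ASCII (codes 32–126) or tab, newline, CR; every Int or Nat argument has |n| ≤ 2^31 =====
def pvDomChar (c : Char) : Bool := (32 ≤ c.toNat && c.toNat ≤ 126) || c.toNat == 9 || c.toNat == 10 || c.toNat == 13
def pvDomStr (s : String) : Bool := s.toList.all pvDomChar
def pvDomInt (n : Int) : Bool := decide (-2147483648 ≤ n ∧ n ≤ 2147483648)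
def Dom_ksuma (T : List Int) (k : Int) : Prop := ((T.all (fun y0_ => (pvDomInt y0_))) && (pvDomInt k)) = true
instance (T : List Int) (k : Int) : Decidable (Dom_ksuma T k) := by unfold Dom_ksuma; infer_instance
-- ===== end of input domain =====

-- B replaces A's per-step O(k) slice minimum by an amortized O(1) two-stack min-queue (O(n) total).


-- ===== PORT A =====
def ksuma (T : List Int) (k : Int) : Int :=
  let n : Int := (T.length : Int)
  let f0 : List Int := (PySem.List.pyRange 0 n 1).map (fun _ => (0 : Int))
  let f1 : List Int := (PySem.List.pyRange 0 k 1).foldl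
      (fun f i => f.set i.toNat ((PySem.List.pyGet? T i).getD 0)) f0
  let f2 : List Int := (PySem.List.pyRange k n 1).foldl
      (fun f i => f.set i.toNat
        (((PySem.List.min? (PySem.List.slice f (some (i - k)) (some i)) (fun x => x)).getD 0)
          + (PySem.List.pyGet? T i).getD 0)) f1
  (PySem.List.min? (PySem.List.slice f2 (some (n - k)) (some n)) (fun x => x)).getD 0

-- ===== PORT B =====
-- stack of (value, min of the stack); head = top (Python's list end)
def pvPush (st : List (Int × Int)) (v : Int) : List (Int × Int) :=
  match st with
  | [] => [(v, v)]
  | (w, m) :: rest => (v, min v m) :: (w, m) :: rest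

-- qmin(); both-empty is unreachable under Pre (Python would raise there)
def pvQmin (front back : List (Int × Int)) : Int :=
  match front, back with
  | [], [] => 0
  | [], (_, m) :: _ => m
  | (_, m) :: _, [] => m
  | (_, mf) :: _, (_, mb) :: _ => min mf mb

-- 'while back: push(front, back.pop()[0])'
def pvRefill (front : List (Int × Int)) : List (Int × Int) → List (Int × Int)
  | [] => front
  | (v, _) :: rest => pvRefill (pvPush front v) rest

def ksuma_alt (T : List Int) (k : Int) : Int :=
  let n : Int := (T.length : Int)
  let st := (PySem.List.pyRange 0 n 1).foldl
    (fun (s : List (Int × Int) × List (Int × Int)) i =>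
      let fi : Int := if i < k then (PySem.List.pyGet? T i).getD 0
                      else pvQmin s.1 s.2 + (PySem.List.pyGet? T i).getD 0
      let back' := pvPush s.2 fi
      if k ≤ i then
        -- popleft()
        if s.1 = [] then ((pvRefill [] back').tail, ([] : List (Int × Int)))
        else (s.1.tail, back')
      else (s.1, back'))
    ([], [])
  pvQmin st.1 st.2

-- ===== PRECONDITION & SPEC =====
-- A raises (IndexError/ValueError on empty slices) exactly when k < 1 or k > len(T); Pre_ keeps 1 ≤ k ≤ len(T).
def Pre_ksuma (T : List Int) (k : Int) : Prop := 1 ≤ k ∧ k ≤ (T.length : Int)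
instance (T : List Int) (k : Int) : Decidable (Pre_ksuma T k) := by unfold Pre_ksuma; infer_instance
def pvWitness_ksuma : List Int × Int := ([3, -1, 4, 1, -5], 2)

def Spec_ksuma (T : List Int) (k : Int) (out : Int) : Prop := out = ksuma_alt T k
instance (T : List Int) (k : Int) (out : Int) : Decidable (Spec_ksuma T k out) := by unfold Spec_ksuma; infer_instance

-- ===== CLAIM (what is proved, stated in full; the proofs are below) =====
def Claim_equal_ksuma : Prop := ∀ (T : List Int) (k : Int), Dom_ksuma T k → Pre_ksuma T k → Spec_ksuma T k (ksuma T k)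

-- ===== LEMMAS AND PROOFS =====

def minI : List Int → Int
  | [] => 0
  | x :: xs => xs.foldl min x
theorem foldl_min_assoc (l : List Int) : ∀ a b : Int, l.foldl min (min a b) = min a (l.foldl min b) := by
  induction l with
  | nil => intro a b; rfl
  | cons x xs ih =>
    intro a b
    simp only [List.foldl_cons, min_assoc]
    exact ih a (min b x)
theorem minA_eq_min_minI (l : List Int) (h : l ≠ []) (a : Int) :
    l.foldl min a = min a (minI l) := by
  cases l with
  | nil => exact absurd rfl h
  | cons y ys =>
    simp only [List.foldl_cons, minI]
    exact foldl_min_assoc ys a y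
theorem minI_append (l1 l2 : List Int) (h1 : l1 ≠ []) (h2 : l2 ≠ []) :
    minI (l1 ++ l2) = min (minI l1) (minI l2) := by
  cases l1 with
  | nil => exact absurd rfl h1
  | cons x xs =>
    simp only [List.cons_append, minI, List.foldl_append]
    rw [minA_eq_min_minI l2 h2]; rfl
theorem minI_reverse (l : List Int) : minI l.reverse = minI l := by
  induction l with
  | nil => rfl
  | cons x xs ih =>
    by_cases hxs : xs = []
    · subst hxs; rfl
    · rw [List.reverse_cons, minI_append _ [x] (by simpa using hxs) (by simp), ih]
      show min (minI xs) x = minI (x :: xs)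
      rw [show minI (x :: xs) = xs.foldl min x from rfl, minA_eq_min_minI xs hxs, min_comm]
theorem min?_id_getD (l : List Int) (h : l ≠ []) :
    (PySem.List.min? l (fun x => x)).getD 0 = minI l := by
  cases l with
  | nil => exact absurd rfl h
  | cons x xs => rw [PySem.List.min?_id_cons]; rfl
def ann : List Int → List (Int × Int)
  | [] => []
  | v :: vs => (v, minI (v :: vs)) :: ann vs

theorem ann_push (vs : List Int) (v : Int) : pvPush (ann vs) v = ann (v :: vs) := by
  cases vs with
  | nil => rfl
  | cons w ws =>
    show (v, min v (minI (w :: ws))) :: (w, minI (w :: ws)) :: ann ws = _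
    have : min v (minI (w :: ws)) = minI (v :: w :: ws) := by
      show _ = (w :: ws).foldl min v
      rw [minA_eq_min_minI (w :: ws) (by simp) v]
    rw [this]; rfl

theorem refill_ann (bvs : List Int) : ∀ fvs : List Int,
    pvRefill (ann fvs) (ann bvs) = ann (bvs.reverse ++ fvs) := by
  induction bvs with
  | nil => intro fvs; rfl
  | cons b bs ih =>
    intro fvs
    show pvRefill (pvPush (ann fvs) b) (ann bs) = _
    rw [ann_push, ih (b :: fvs)]
    simp

theorem qmin_ann (fvs bvs : List Int) (h : fvs ++ bvs.reverse ≠ []) :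
    pvQmin (ann fvs) (ann bvs) = minI (fvs ++ bvs.reverse) := by
  cases fvs with
  | nil =>
    cases bvs with
    | nil => exact absurd rfl h
    | cons b bs =>
      show minI (b :: bs) = _
      rw [List.nil_append, minI_reverse]
  | cons f fs =>
    cases bvs with
    | nil => simp [pvQmin, ann]
    | cons b bs =>
      show min (minI (f :: fs)) (minI (b :: bs)) = _
      rw [minI_append (f :: fs) (b :: bs).reverse (by simp) (by simp), minI_reverse]
def fStep (T : List Int) (kn : Nat) (f : List Int) (m : Nat) : Int :=
  if m < kn then T.getD m 0 else minI (f.drop (m - kn)) + T.getD m 0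
def fDP (T : List Int) (kn : Nat) : Nat → List Int
  | 0 => []
  | m + 1 => fDP T kn m ++ [fStep T kn (fDP T kn m) m]
theorem fDP_length (T : List Int) (kn m : Nat) : (fDP T kn m).length = m := by
  induction m with
  | zero => rfl
  | succ m ih => simp [fDP, ih]
theorem fDP_take (T : List Int) (kn : Nat) : ∀ m, m ≤ kn → m ≤ T.length → fDP T kn m = T.take m := by
  intro m
  induction m with
  | zero => simp [fDP]
  | succ m ih =>
    intro h hl
    rw [fDP, ih (by omega) (by omega), List.take_succ_eq_append_getElem (by omega)]
    congr 1
    simp [fStep, if_pos (by omega : m < kn), List.getElem?_eq_getElem (by omega : m < T.length)]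

theorem set_app (l1 l2 : List Int) (v : Int) : (l1 ++ l2).set l1.length v = l1 ++ l2.set 0 v := by
  induction l1 with
  | nil => simp
  | cons x xs ih => simp [ih]

theorem set_app' (l1 l2 : List Int) (n : Nat) (v : Int) (h : n = l1.length) :
    (l1 ++ l2).set n v = l1 ++ l2.set 0 v := by
  subst h; exact set_app l1 l2 v

theorem setloop (T : List Int) : ∀ m, m ≤ T.length →
    (List.range m).foldl (fun f j => f.set j (T.getD j 0)) (List.replicate T.length (0:Int))
      = T.take m ++ List.replicate (T.length - m) 0 := by
  intro m
  induction m with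
  | zero => simp
  | succ m ih =>
    intro h
    rw [List.range_succ, List.foldl_append, ih (by omega)]
    have hrep : List.replicate (T.length - m) (0:Int) = 0 :: List.replicate (T.length - (m+1)) 0 := by
      have : T.length - m = (T.length - (m+1)) + 1 := by omega
      rw [this, List.replicate_succ]
    have hlen : (T.take m).length = m := by simp; omega
    rw [List.foldl_cons, List.foldl_nil, set_app' _ _ _ _ hlen.symm, hrep]
    simp only [List.set_cons_zero]
    rw [List.take_succ_eq_append_getElem (by omega : m < T.length),
        List.getD_eq_getElem T 0 (by omega : m < T.length), List.append_assoc]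
    rfl

-- the second loop of A, as a fold over List.range
theorem loopA2 (T : List Int) (k' : Nat) (hk1 : 1 ≤ k') (hk2 : k' ≤ T.length) :
    ∀ c, c ≤ T.length - k' →
    (List.range c).foldl
      (fun f j => f.set (k' + j)
        (((PySem.List.min? (PySem.List.slice f (some ((j:Nat):Int)) (some ((k'+j : Nat):Int))) (fun x => x)).getD 0)
          + (T[(k'+j)]?).getD 0))
      (T.take k' ++ List.replicate (T.length - k') 0)
      = fDP T k' (k' + c) ++ List.replicate (T.length - (k' + c)) 0 := by
  intro c
  induction c with
  | zero =>
    intro _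
    simp only [List.range_zero, List.foldl_nil, Nat.add_zero, fDP_take T k' k' le_rfl hk2]
  | succ c ih =>
    intro h
    rw [List.range_succ, List.foldl_append, ih (by omega), List.foldl_cons, List.foldl_nil]
    set f := fDP T k' (k' + c) with hf
    have hflen : f.length = k' + c := fDP_length T k' (k' + c)
    -- the slice is the window f[c : k'+c]
    have hslice : PySem.List.slice (f ++ List.replicate (T.length - (k' + c)) (0:Int))
        (some ((c:Nat):Int)) (some ((k'+c : Nat):Int)) = f.drop c := by
      rw [PySem.List.slice_natCast, List.drop_append_of_le_length (by omega),
          show k' + c - c = k' from by omega]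
      rw [List.take_append_of_le_length (by simp only [List.length_drop, hflen]; omega),
          List.take_of_length_le (by simp only [List.length_drop, hflen]; omega)]
    have hdropne : f.drop c ≠ [] := by
      intro hnil
      have := congrArg List.length hnil
      simp [hflen] at this
      omega
    have hstep : ((PySem.List.min? (f.drop c) (fun x => x)).getD 0) + ((T[(k'+c)]?).getD 0)
        = fStep T k' f (k' + c) := by
      rw [min?_id_getD _ hdropne, fStep, if_neg (by omega), show k' + c - k' = c from by omega]
      rfl
    rw [hslice, hstep]
    have hset : ((f ++ List.replicate (T.length - (k' + c)) (0:Int)).set (k' + c) (fStep T k' f (k' + c)))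
        = fDP T k' (k' + c + 1) ++ List.replicate (T.length - (k' + c + 1)) 0 := by
      have hrep : List.replicate (T.length - (k'+c)) (0:Int) = 0 :: List.replicate (T.length - (k'+c+1)) 0 := by
        have : T.length - (k'+c) = (T.length - (k'+c+1)) + 1 := by omega
        rw [this, List.replicate_succ]
      rw [set_app' _ _ _ _ (by omega : k' + c = f.length), hrep, List.set_cons_zero, fDP, ← hf,
          List.append_assoc]
      rfl
    rw [hset, show k' + c + 1 = k' + (c+1) from rfl]
theorem ksuma_eq_dp (T : List Int) (k : Int) (h1 : 1 ≤ k) (h2 : k ≤ (T.length : Int)) :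
    ksuma T k = minI ((fDP T k.toNat T.length).drop (T.length - k.toNat)) := by
  have hk : k = (k.toNat : Int) := (Int.toNat_of_nonneg (by omega)).symm
  set k' := k.toNat with hk'
  have hk1 : 1 ≤ k' := by omega
  have hk2 : k' ≤ T.length := by omega
  simp only [ksuma]
  -- f0
  have hf0 : (PySem.List.pyRange 0 (T.length:Int) 1).map (fun _ => (0:Int))
      = List.replicate T.length 0 := by
    rw [PySem.List.pyRange_one, List.map_map, List.eq_replicate_iff]
    exact ⟨by simp, by simp⟩
  rw [hf0]
  -- first loop
  have hl1 : (PySem.List.pyRange 0 k 1).foldl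
      (fun f i => f.set i.toNat ((PySem.List.pyGet? T i).getD 0)) (List.replicate T.length 0)
      = T.take k' ++ List.replicate (T.length - k') 0 := by
    rw [hk, PySem.List.pyRange_one, List.foldl_map, ← setloop T k' hk2]
    apply List.foldl_ext
    intro f j hj
    simp [List.getD_eq_getElem?_getD]
  rw [hl1]
  -- second loop
  have hl2 : (PySem.List.pyRange k (T.length:Int) 1).foldl
      (fun f i => f.set i.toNat
        (((PySem.List.min? (PySem.List.slice f (some (i - k)) (some i)) (fun x => x)).getD 0)
          + (PySem.List.pyGet? T i).getD 0))
      (T.take k' ++ List.replicate (T.length - k') 0)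
      = fDP T k' T.length := by
    rw [hk, PySem.List.pyRange_one, List.foldl_map]
    have hcnt : (((T.length:Int)) - (k':Int)).toNat = T.length - k' := by omega
    rw [hcnt]
    have := loopA2 T k' hk1 hk2 (T.length - k') le_rfl
    rw [show k' + (T.length - k') = T.length from by omega, Nat.sub_self, List.replicate_zero,
        List.append_nil] at this
    rw [← this]
    apply List.foldl_ext
    intro f j hj
    have e1 : ((k':Int) + (j:Int)) = ((k' + j : Nat) : Int) := by omega
    have e2 : ((k':Int) + (j:Int)) - (k':Int) = ((j:Nat):Int) := by omega
    rw [e2, e1]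
    simp only [Int.toNat_natCast, PySem.List.pyGet?_natCast]
  rw [hl2]
  -- final slice and min
  have e3 : ((T.length:Int)) - k = ((T.length - k' : Nat) : Int) := by omega
  rw [e3, show ((T.length:Int)) = ((T.length : Nat) : Int) from rfl, PySem.List.slice_natCast]
  have hlen : (fDP T k' T.length).length = T.length := fDP_length T k' T.length
  rw [List.take_of_length_le (by simp [hlen])]
  apply min?_id_getD
  intro hnil
  have := congrArg List.length hnil
  simp [hlen] at this
  omega
theorem ann_tail (l : List Int) : (ann l).tail = ann l.tail := by
  cases l <;> simp [ann]
def stepB (T : List Int) (k' : Nat) (s : List (Int × Int) × List (Int × Int)) (j : Nat) :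
    List (Int × Int) × List (Int × Int) :=
  let fi : Int := if j < k' then (T[j]?).getD 0 else pvQmin s.1 s.2 + (T[j]?).getD 0
  let back' := pvPush s.2 fi
  if k' ≤ j then
    if s.1 = [] then ((pvRefill [] back').tail, [])
    else (s.1.tail, back')
  else (s.1, back')

theorem loopB_inv (T : List Int) (k' : Nat) (hk1 : 1 ≤ k') :
    ∀ m, ∃ fvs bvs,
      (List.range m).foldl (stepB T k') ([], []) = (ann fvs, ann bvs) ∧
      fvs ++ bvs.reverse = (fDP T k' m).drop (m - k') := by
  intro m
  induction m with
  | zero => exact ⟨[], [], rfl, by simp [fDP]⟩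
  | succ m ih =>
    obtain ⟨fvs, bvs, heq, hq⟩ := ih
    rw [List.range_succ, List.foldl_append, heq, List.foldl_cons, List.foldl_nil]
    have hqlen : (fvs ++ bvs.reverse).length = m - (m - k') := by
      rw [hq, List.length_drop, fDP_length]
    by_cases hm : m < k'
    · -- growing phase: no pop
      refine ⟨fvs, (T.getD m 0) :: bvs, ?_, ?_⟩
      · simp only [stepB, if_pos hm, if_neg (by omega : ¬ k' ≤ m)]
        rw [ann_push]
        rfl
      · rw [List.reverse_cons, ← List.append_assoc, hq]
        rw [show m - k' = 0 from by omega, show m + 1 - k' = 0 from by omega,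
            List.drop_zero, List.drop_zero, fDP]
        congr 1
        simp [fStep, if_pos hm]
    · -- steady phase: pop after push
      have hne : fvs ++ bvs.reverse ≠ [] := by
        intro h0
        rw [h0] at hqlen
        simp at hqlen
        omega
      have hfi : (if m < k' then (T[m]?).getD 0 else pvQmin (ann fvs) (ann bvs) + (T[m]?).getD 0)
          = fStep T k' (fDP T k' m) m := by
        rw [if_neg hm, qmin_ann fvs bvs hne, hq, fStep, if_neg hm]
        rfl
      have hpre : fvs ++ (fStep T k' (fDP T k' m) m :: bvs).reverse
          = (fDP T k' (m+1)).drop (m - k') := by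
        rw [List.reverse_cons, ← List.append_assoc, hq, fDP,
            List.drop_append_of_le_length (by rw [fDP_length]; omega)]
      cases fvs with
      | nil =>
        refine ⟨(fStep T k' (fDP T k' m) m :: bvs).reverse.tail, [], ?_, ?_⟩
        · simp only [stepB, hfi, if_pos (by omega : k' ≤ m)]
          rw [if_pos (by simp [ann])]
          show ((pvRefill (ann []) (pvPush (ann bvs) _)).tail, _) = _
          rw [ann_push, refill_ann, List.append_nil, ann_tail]
          rfl
        · rw [List.reverse_nil, List.append_nil, show m + 1 - k' = (m - k') + 1 from by omega,
              ← List.tail_drop, ← hpre, List.nil_append]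
      | cons v vs =>
        refine ⟨vs, fStep T k' (fDP T k' m) m :: bvs, ?_, ?_⟩
        · simp only [stepB, hfi, if_pos (by omega : k' ≤ m)]
          rw [if_neg (by simp [ann]), ann_push]
          show ((ann (v :: vs)).tail, _) = _
          rw [ann_tail]
          rfl
        · have : (v :: vs ++ (fStep T k' (fDP T k' m) m :: bvs).reverse).tail
              = (fDP T k' (m+1)).drop (m - k' + 1) := by
            rw [List.cons_append] at hpre ⊢
            rw [hpre, List.tail_drop]
          rw [show m + 1 - k' = (m - k') + 1 from by omega, ← this]
          rfl

theorem ksuma_alt_eq_dp (T : List Int) (k : Int) (h1 : 1 ≤ k) (h2 : k ≤ (T.length : Int)) :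
    ksuma_alt T k = minI ((fDP T k.toNat T.length).drop (T.length - k.toNat)) := by
  have hk : k = (k.toNat : Int) := (Int.toNat_of_nonneg (by omega)).symm
  set k' := k.toNat with hk'
  have hk1 : 1 ≤ k' := by omega
  have hk2 : k' ≤ T.length := by omega
  simp only [ksuma_alt]
  have hfold : (PySem.List.pyRange 0 (T.length:Int) 1).foldl
      (fun (s : List (Int × Int) × List (Int × Int)) i =>
        let fi : Int := if i < k then (PySem.List.pyGet? T i).getD 0
                        else pvQmin s.1 s.2 + (PySem.List.pyGet? T i).getD 0
        let back' := pvPush s.2 fi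
        if k ≤ i then
          if s.1 = [] then ((pvRefill [] back').tail, ([] : List (Int × Int)))
          else (s.1.tail, back')
        else (s.1, back'))
      ([], [])
      = (List.range T.length).foldl (stepB T k') ([], []) := by
    rw [PySem.List.pyRange_one, List.foldl_map,
        show ((T.length:Int) - 0).toNat = T.length from by omega]
    apply List.foldl_ext
    intro s j hj
    simp only [stepB, hk, zero_add, PySem.List.pyGet?_natCast, Nat.cast_lt, Nat.cast_le]
  rw [hfold]
  obtain ⟨fvs, bvs, heq, hq⟩ := loopB_inv T k' hk1 T.length
  rw [heq]
  show pvQmin (ann fvs) (ann bvs) = _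
  rw [qmin_ann fvs bvs, hq]
  intro h0
  have := congrArg List.length (hq ▸ h0)
  rw [List.length_drop, fDP_length] at this
  simp at this
  omega

-- ===== VERDICT (by name: the statement is the Claim_ definition above) =====
theorem ksuma_spec : Claim_equal_ksuma := by
  intro T k _ hpre
  unfold Spec_ksuma
  rw [ksuma_eq_dp T k hpre.1 hpre.2, ksuma_alt_eq_dp T k hpre.1 hpre.2]
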